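-- pv_equiv track=rewrite | github.com/sanghyeon1225/baekjoonSolved | 프로그래머스/1/82612. 부족한 금액 계산하기/부족한 금액 계산하기.py | solution
-- ===== SOURCE A (Python) =====
-- def solution(price, money, count):
--     time = 0
--     sum = 0
--     for i in range(count):
--         time += 1
--         sum += price * time
--     if (sum > money):
--         return sum - money
--     else:
--         return 0
-- ===== SOURCE B (Python) =====
-- def solution(price, money, count):
--     n = max(count, 0)
--     total = price * n * (n + 1) // 2
--     return max(total - money, 0)
-- ===== Notes on version B (the rewrite author's own statement) =====
-- stated objective: faster
-- what changed: Replaced the O(count) accumulation loop by the closed-form arithmetic-series total price*count*(count+1)//2 and a max for the shortfall.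
import Mathlib
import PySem

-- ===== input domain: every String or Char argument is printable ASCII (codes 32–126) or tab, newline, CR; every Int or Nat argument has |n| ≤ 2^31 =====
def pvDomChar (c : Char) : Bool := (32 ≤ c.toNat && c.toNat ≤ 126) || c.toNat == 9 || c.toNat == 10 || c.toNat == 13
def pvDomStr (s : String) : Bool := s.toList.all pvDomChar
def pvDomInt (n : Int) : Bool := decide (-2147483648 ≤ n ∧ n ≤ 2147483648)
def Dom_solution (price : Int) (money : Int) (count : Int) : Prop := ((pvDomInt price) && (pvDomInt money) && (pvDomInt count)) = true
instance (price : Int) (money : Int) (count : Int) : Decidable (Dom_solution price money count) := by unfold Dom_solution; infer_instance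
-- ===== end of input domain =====

-- B replaces A's O(count) loop by the closed-form arithmetic-series total (objective: faster).

-- ===== PORT A =====
-- for i in range(count): time += 1; sum += price * time
def solution (price : Int) (money : Int) (count : Int) : Int :=
  let st := (PySem.List.pyRange 0 count 1).foldl
    (fun (st : Int × Int) (_ : Int) => (st.1 + 1, st.2 + price * (st.1 + 1))) (0, 0)
  if st.2 > money then st.2 - money else 0

-- ===== PORT B =====
def solution_alt (price : Int) (money : Int) (count : Int) : Int :=
  let n : Int := max count 0
  let total : Int := PySem.Int.floordiv (price * n * (n + 1)) 2
  max (total - money) 0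

-- ===== PRECONDITION & SPEC =====
def Spec_solution (price : Int) (money : Int) (count : Int) (out : Int) : Prop := out = solution_alt price money count
instance (price : Int) (money : Int) (count : Int) (out : Int) : Decidable (Spec_solution price money count out) := by unfold Spec_solution; infer_instance

-- ===== CLAIM (what is proved, stated in full; the proofs are below) =====
def Claim_equal_solution : Prop := ∀ (price : Int) (money : Int) (count : Int), Dom_solution price money count → Spec_solution price money count (solution price money count)

-- ===== LEMMAS AND PROOFS =====

/-- triangular number as an Int, recursively -/
def tri : Nat → Int
  | 0 => 0
  | n + 1 => tri n + (n + 1)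

theorem two_mul_tri (n : Nat) : 2 * tri n = (n : Int) * (n + 1) := by
  induction n with
  | zero => simp [tri]
  | succ m ih =>
    simp only [tri]
    push_cast
    push_cast at ih
    ring_nf
    ring_nf at ih
    omega

theorem loop_go (price : Int) (l : List Int) : ∀ (t s : Int),
    l.foldl (fun (st : Int × Int) (_ : Int) => (st.1 + 1, st.2 + price * (st.1 + 1))) (t, s)
      = (t + l.length, s + price * ((l.length : Int) * t + tri l.length)) := by
  induction l with
  | nil => intro t s; simp [tri]
  | cons a l ih =>
    intro t s
    simp only [List.foldl_cons, ih, List.length_cons]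
    rw [Prod.mk.injEq]
    constructor
    · push_cast; ring
    · have htri : tri (l.length + 1) = tri l.length + (l.length + 1) := rfl
      push_cast [htri]
      ring

theorem solution_eq (price money count : Int) :
    solution price money count = solution_alt price money count := by
  unfold solution solution_alt
  have hlen : (PySem.List.pyRange 0 count 1).length = count.toNat := by
    simp [PySem.List.length_pyRange_one]
  rw [loop_go price _ 0 0, hlen]
  simp only []
  have hn : (max count 0) = ((count.toNat : Int)) := (Int.ofNat_toNat count).symm
  have hdiv : PySem.Int.floordiv (price * max count 0 * (max count 0 + 1)) 2
      = price * tri count.toNat := by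
    have h2 : price * max count 0 * (max count 0 + 1) = 2 * (price * tri count.toNat) := by
      rw [hn]
      rw [mul_assoc, ← two_mul_tri count.toNat]
      ring
    rw [h2, PySem.Int.floordiv_eq_ediv_of_pos (by norm_num)]
    exact Int.mul_ediv_cancel_left _ (by norm_num)
  simp only [hdiv, mul_zero, zero_add]
  by_cases h : price * tri count.toNat > money
  · rw [if_pos h]; omega
  · rw [if_neg h]; omega

-- ===== VERDICT (by name: the statement is the Claim_ definition above) =====
theorem solution_spec : Claim_equal_solution := by
  intro price money count _
  exact solution_eq price money count
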